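-- pv_equiv track=rewrite | github.com/swapnilgupta14/Python-Programs | wr.py | calculate_minimum_shifts
-- ===== SOURCE A (Python) =====
-- def calculate_minimum_shifts(arts):
--   """
--   Calculates the minimum number of shifts to arrange similar arts together.
--
--   Args:
--     arts: A string representing the arts of the participants.
--
--   Returns:
--     The minimum number of shifts required.
--   """
--
--   n = len(arts)
--
--   # Initialize DP table
--   dp = [[float('inf')] * n for _ in range(n)]
--   for i in range(n):
--     dp[i][i] = 0  # Base case
--
--   # Fill the DP table
--   for length in range(2, n+1):
--     for i in range(n - length + 1):
--       j = i + length - 1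
--
--       # Consider all possible shifts of the kth participant (i < k <= j)
--       for k in range(i, j):
--         # Calculate cost of shifting the kth participant
--         cost = shift_cost(i, k, j, arts)
--
--         # Update the DP table
--         dp[i][j] = min(dp[i][j], dp[i][k] + dp[k+1][j] + cost)
--
--   # Return the minimum number of shifts
--   return dp[0][n-1]
--
-- def shift_cost(i, k, j, arts):
--   """
--   Calculates the cost of shifting the kth participant between i and j.
--
--   Args:
--     i: Start index of the range to shift.
--     k: Index of the participant to shift.
--     j: End index of the range to shift.
--     arts: String representing the arts of the participants.
--
--   Returns:
--     The cost of the shift.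
--   """
--
--   # Cost is 1 if the shifted participant is not grouped with its category
--   if not are_grouped_together(k, j, arts):
--     return 1
--
--   # Cost is 0 otherwise
--   return 0
--
-- def are_grouped_together(i, j, arts):
--   """
--   Checks if the participants between i (inclusive) and j (inclusive) are grouped together based on their art category.
--
--   Args:
--     i: Start index of the range.
--     j: End index of the range.
--     arts: String representing the arts of the participants.
--
--   Returns:
--     True if grouped together, False otherwise.
--   """
--
--   art_category = arts[i]
--   for index in range(i+1, j+1):
--     if arts[index] != art_category:
--       return False
--   return True
-- ===== SOURCE B (Python) =====
-- def calculate_minimum_shifts(arts):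
--     # The DP's optimum equals the number of adjacent positions with different arts.
--     total = 0
--     for x, y in zip(arts, arts[1:]):
--         if x != y:
--             total += 1
--     return total
-- ===== Notes on version B (the rewrite author's own statement) =====
-- stated objective: faster
-- what changed: Replaced the O(n^4) interval DP by a single linear pass counting adjacent positions whose characters differ, which is provably the DP's optimum.
import Mathlib
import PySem

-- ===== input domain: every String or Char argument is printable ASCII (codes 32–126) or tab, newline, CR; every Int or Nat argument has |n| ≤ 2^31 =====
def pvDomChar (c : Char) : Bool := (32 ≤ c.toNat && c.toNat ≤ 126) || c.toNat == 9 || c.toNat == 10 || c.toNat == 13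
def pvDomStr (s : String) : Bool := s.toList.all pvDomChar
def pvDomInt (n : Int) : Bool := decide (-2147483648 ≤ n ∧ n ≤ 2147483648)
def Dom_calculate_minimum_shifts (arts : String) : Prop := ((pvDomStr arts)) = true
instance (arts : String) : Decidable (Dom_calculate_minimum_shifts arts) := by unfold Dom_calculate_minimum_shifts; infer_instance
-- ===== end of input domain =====

-- B replaces A's O(n^4) interval DP by one linear pass counting adjacent unequal characters (proved equal to the DP's optimum).


-- ===== PORT A =====
-- are_grouped_together(i, j, arts): early-exit loop over range(i+1, j+1) comparing arts[index] with arts[i].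
-- Indices are always in range at every call site (A only calls it with 0 ≤ i ≤ j < len(arts)), so `getElem?`
-- comparison is exact there.
def pvAgt (i j : Nat) (l : List Char) : Bool :=
  (List.range' (i+1) (j - i)).all (fun idx => l[idx]? == l[i]?)

-- shift_cost(i, k, j, arts): the first parameter is unused, as in the Python.
def pvShiftCost (_i k j : Nat) (l : List Char) : Int :=
  if ¬ (pvAgt k j l = true) then 1 else 0

-- dp cell: `none` models Python's float('inf'); A's result cell is always a finite int for n ≥ 1.
def pvMinInf : Option Int → Option Int → Option Int
  | none, y => y
  | some x, none => some x
  | some x, some y => some (min x y)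

def pvAddInf : Option Int → Option Int → Option Int
  | some x, some y => some (x + y)
  | _, _ => none

-- dp[i][j] read / write on the list-of-lists table (Python's dp[i][j]); every access A makes is in range,
-- so getD/set match Python's list indexing and item assignment exactly there.
def pvGet2 (dp : List (List (Option Int))) (i j : Nat) : Option Int :=
  ((dp[i]?.getD [])[j]?).getD none

def pvSet2 (dp : List (List (Option Int))) (i j : Nat) (v : Option Int) : List (List (Option Int)) :=
  dp.set i ((dp[i]?.getD []).set j v)

-- the body of the innermost (k-)loop, with (i, j) fixed: dp[i][j] = min(dp[i][j], dp[i][k] + dp[k+1][j] + shift_cost(i, k, j, arts))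
def pvStep (l : List Char) (i j : Nat) (dp : List (List (Option Int))) (k : Nat) : List (List (Option Int)) :=
  pvSet2 dp i j (pvMinInf (pvGet2 dp i j)
    (pvAddInf (pvAddInf (pvGet2 dp i k) (pvGet2 dp (k+1) j)) (some (pvShiftCost i k j l))))

def calculate_minimum_shifts (arts : String) : Int :=
  let l := arts.toList
  let n := l.length
  -- dp = [[float('inf')] * n for _ in range(n)]; `none` models float('inf')
  let dp0 := (List.range n).map (fun _ => List.replicate n (none : Option Int))
  -- for i in range(n): dp[i][i] = 0
  let dp1 := (List.range n).foldl (fun dp i => pvSet2 dp i i (some 0)) dp0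
  -- for length in range(2, n+1): for i in range(n-length+1): j = i+length-1; for k in range(i, j): …
  let dp := (List.range' 2 (n - 1)).foldl (fun dp length =>
      (List.range (n - length + 1)).foldl (fun dp i =>
        let j := i + length - 1
        (List.range' i (j - i)).foldl (pvStep l i j) dp) dp) dp1
  -- return dp[0][n-1]; for n ≥ 1 this cell is a finite int, n = 0 raises and is excluded by Pre_
  (pvGet2 dp 0 (n - 1)).getD 0

-- ===== PORT B =====
def calculate_minimum_shifts_alt (arts : String) : Int :=
  let l := arts.toList
  (l.zip l.tail).foldl (fun acc p => if p.1 ≠ p.2 then acc + 1 else acc) 0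

-- ===== PRECONDITION & SPEC =====
-- Pre_ excludes only the empty string, on which A raises IndexError (dp[0][-1] on an empty table).
def Pre_calculate_minimum_shifts (arts : String) : Prop := arts ≠ ""
instance (arts : String) : Decidable (Pre_calculate_minimum_shifts arts) := by unfold Pre_calculate_minimum_shifts; infer_instance
def pvWitness_calculate_minimum_shifts : String := "aabba"

def Spec_calculate_minimum_shifts (arts : String) (out : Int) : Prop := out = calculate_minimum_shifts_alt arts
instance (arts : String) (out : Int) : Decidable (Spec_calculate_minimum_shifts arts out) := by unfold Spec_calculate_minimum_shifts; infer_instance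

-- ===== CLAIM (what is proved, stated in full; the proofs are below) =====
def Claim_equal_calculate_minimum_shifts : Prop := ∀ (arts : String), Dom_calculate_minimum_shifts arts → Pre_calculate_minimum_shifts arts → Spec_calculate_minimum_shifts arts (calculate_minimum_shifts arts)

-- ===== LEMMAS AND PROOFS =====

-- proof-layer abstraction: the table as a function (the list-of-lists table is bridged to it below)
def pvUpd (f : Nat → Nat → Option Int) (i j : Nat) (v : Option Int) : Nat → Nat → Option Int :=
  fun a b => if a = i ∧ b = j then v else f a b

def pvStepF (l : List Char) (i j : Nat) (f : Nat → Nat → Option Int) (k : Nat) : Nat → Nat → Option Int :=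
  pvUpd f i j (pvMinInf (f i j)
    (pvAddInf (pvAddInf (f i k) (f (k+1) j)) (some (pvShiftCost i k j l))))


-- number of boundaries t ∈ [i, j) with l[t] ≠ l[t+1]
def pvBnd (l : List Char) (i j : Nat) : Int :=
  (((List.range' i (j - i)).filter (fun t => !(l[t]? == l[t+1]?))).length : Int)

theorem pvBnd_self (l : List Char) (i : Nat) : pvBnd l i i = 0 := by
  simp [pvBnd]


theorem split_range (i k j : Nat) (h1 : i ≤ k) (h2 : k < j) :
    List.range' i (j - i) = List.range' i (k - i) ++ k :: List.range' (k+1) (j - k - 1) := by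
  have e2 : i + 1 * (k - i) = k := by omega
  have e1 : k - i + (j - i - (k - i)) = j - i := by omega
  have h := @List.range'_append i (k-i) ((j-i)-(k-i)) 1
  rw [e2, e1] at h
  rw [← h]
  congr 1
  have e3 : j - i - (k - i) = (j - k - 1) + 1 := by omega
  rw [e3, List.range'_succ]

-- split at k: b i j = b i k + d k + b (k+1) j for i ≤ k < j
theorem pvBnd_split (l : List Char) (i k j : Nat) (hik : i ≤ k) (hkj : k < j) :
    pvBnd l i j = pvBnd l i k + (if l[k]? == l[k+1]? then 0 else 1) + pvBnd l (k+1) j := by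
  unfold pvBnd
  rw [split_range i k j hik hkj, List.filter_append, List.filter_cons]
  have e : j - (k+1) = j - k - 1 := by omega
  rw [e]
  by_cases h : (l[k]? == l[k+1]?) = true
  · simp [h]
  · simp [h]
    ring

theorem pvAgt_false_of_ne (l : List Char) (k j : Nat) (hkj : k < j)
    (h : ¬ (l[k]? == l[k+1]?) = true) : pvAgt k j l = false := by
  unfold pvAgt
  rw [List.all_eq_false]
  refine ⟨k+1, ?_, ?_⟩
  · rw [List.mem_range'_1]; omega
  · simp only [beq_iff_eq] at h ⊢
    exact fun e => h e.symm

theorem pvAgt_last (l : List Char) (j : Nat) (hj : 0 < j) :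
    pvAgt (j-1) j l = (l[j]? == l[j-1]?) := by
  unfold pvAgt
  have e1 : j - 1 + 1 = j := by omega
  have e2 : j - (j - 1) = 1 := by omega
  rw [e1, e2]
  simp [List.range']

theorem pvUpd_self (f : Nat → Nat → Option Int) (i j : Nat) (v : Option Int) :
    pvUpd f i j v i j = v := by simp [pvUpd]

theorem pvUpd_upd (f : Nat → Nat → Option Int) (i j : Nat) (v v' : Option Int) :
    pvUpd (pvUpd f i j v) i j v' = pvUpd f i j v' := by
  funext a b; by_cases h : a = i ∧ b = j <;> simp [pvUpd, h]

theorem pvUpd_none (f : Nat → Nat → Option Int) (i j : Nat) (h : f i j = none) :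
    pvUpd f i j none = f := by
  funext a b; simp only [pvUpd]; split
  · rename_i hab; rw [hab.1, hab.2, h]
  · rfl

theorem pvShiftCost_nonneg (i k j : Nat) (l : List Char) : 0 ≤ pvShiftCost i k j l := by
  unfold pvShiftCost; split <;> norm_num

-- every candidate term of the min is at least the boundary count
theorem pvTerm_ge (l : List Char) (i k j : Nat) (hik : i ≤ k) (hkj : k < j) :
    pvBnd l i j ≤ pvBnd l i k + pvBnd l (k+1) j + pvShiftCost i k j l := by
  rw [pvBnd_split l i k j hik hkj]
  by_cases hb : (l[k]? == l[k+1]?) = true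
  · have := pvShiftCost_nonneg i k j l
    simp only [hb, if_pos]
    linarith
  · have hagt := pvAgt_false_of_ne l k j hkj hb
    have : pvShiftCost i k j l = 1 := by simp [pvShiftCost, hagt]
    rw [this, if_neg hb]
    linarith

-- the last candidate (k = j-1) attains the boundary count
theorem pvTerm_last (l : List Char) (i j : Nat) (hij : i < j) :
    pvBnd l i (j-1) + pvBnd l ((j-1)+1) j + pvShiftCost i (j-1) j l = pvBnd l i j := by
  have hsp := pvBnd_split l i (j-1) j (by omega) (by omega)
  have hcost : pvShiftCost i (j-1) j l = if l[j-1]? == l[(j-1)+1]? then 0 else 1 := by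
    have e : j - 1 + 1 = j := by omega
    unfold pvShiftCost
    rw [pvAgt_last l j (by omega), e]
    by_cases hb : l[j-1]? = l[j]?
    · simp [hb]
    · have hb' : ¬ l[j]? = l[j-1]? := fun hh => hb hh.symm
      simp [hb, hb']
  rw [hsp, hcost]
  have h0 : pvBnd l j j = 0 := pvBnd_self l j
  have e : j - 1 + 1 = j := by omega
  rw [e] at *
  split
  all_goals rw [h0]
  all_goals ring

-- evaluating one k-step on a table that is f with cell (i,j) overwritten
theorem pvStepF_eval (l : List Char) (f : Nat → Nat → Option Int) (i j : Nat)
    (hsub : ∀ a b, a ≤ b → b ≤ j → b - a < j - i → f a b = some (pvBnd l a b))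
    (w : Option Int) (k : Nat) (hik : i ≤ k) (hkj : k < j) :
    pvStepF l i j (pvUpd f i j w) k =
      pvUpd f i j (pvMinInf w
        (some (pvBnd l i k + pvBnd l (k+1) j + pvShiftCost i k j l))) := by
  unfold pvStepF
  have r1 : pvUpd f i j w i j = w := pvUpd_self f i j w
  have r2 : pvUpd f i j w i k = f i k := by simp [pvUpd]; intro h; omega
  have r3 : pvUpd f i j w (k+1) j = f (k+1) j := by simp [pvUpd]; intro h; omega
  rw [r1, r2, r3, hsub i k hik (by omega) (by omega),
      hsub (k+1) j (by omega) le_rfl (by omega), pvUpd_upd]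
  rfl

-- invariant of the k-fold: only cell (i,j) changes, and it holds a min that reaches pvBnd l i j at the end
theorem pvStepF_fold_aux (l : List Char) (f : Nat → Nat → Option Int) (i j : Nat)
    (hij : i < j)
    (hsub : ∀ a b, a ≤ b → b ≤ j → b - a < j - i → f a b = some (pvBnd l a b))
    (hfij : f i j = none) :
    ∀ m, m ≤ j - i → ∃ v, (List.range' i m).foldl (pvStepF l i j) f = pvUpd f i j v ∧
      (m = 0 → v = none) ∧
      (1 ≤ m → ∃ w, v = some w ∧ pvBnd l i j ≤ w ∧ (i + m = j → w = pvBnd l i j)) := by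
  intro m
  induction m with
  | zero =>
    intro _
    exact ⟨none, by rw [List.range', List.foldl_nil, pvUpd_none f i j hfij], fun _ => rfl, by omega⟩
  | succ p ih =>
    intro hm
    obtain ⟨v, hfold, h0, h1⟩ := ih (by omega)
    have hk1 : i ≤ i + p := by omega
    have hk2 : i + p < j := by omega
    have concat : List.range' i (p+1) = List.range' i p ++ [i+p] := by
      have := @List.range'_concat 1 i p
      simpa using this
    refine ⟨pvMinInf v (some (pvBnd l i (i+p) + pvBnd l ((i+p)+1) j + pvShiftCost i (i+p) j l)), ?_, by omega, ?_⟩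
    · rw [concat, List.foldl_append, List.foldl_cons, List.foldl_nil, hfold,
        pvStepF_eval l f i j hsub v (i+p) hk1 hk2]
    · intro _
      by_cases hp : p = 0
      · subst hp
        have hv : v = none := h0 rfl
        subst hv
        refine ⟨_, rfl, pvTerm_ge l i (i+0) j (by omega) (by omega), ?_⟩
        intro hj
        have e : i + 0 = j - 1 := by omega
        rw [e]
        exact pvTerm_last l i j hij
      · obtain ⟨w, hv, hw, hlast⟩ := h1 (by omega)
        subst hv
        have hterm := pvTerm_ge l i (i+p) j hk1 hk2
        refine ⟨_, rfl, ?_, ?_⟩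
        · exact le_min hw hterm
        · intro hj
          have e : i + p = j - 1 := by omega
          have hT : pvBnd l i (i+p) + pvBnd l ((i+p)+1) j + pvShiftCost i (i+p) j l = pvBnd l i j := by
            rw [e]; exact pvTerm_last l i j hij
          show min w _ = _
          rw [hT]
          omega

-- the complete k-fold computes exactly the boundary count into cell (i,j)
theorem inner_fold (l : List Char) (f : Nat → Nat → Option Int) (i j : Nat)
    (hij : i < j)
    (hsub : ∀ a b, a ≤ b → b ≤ j → b - a < j - i → f a b = some (pvBnd l a b))
    (hfij : f i j = none) :
    (List.range' i (j - i)).foldl (pvStepF l i j) f = pvUpd f i j (some (pvBnd l i j)) := by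
  obtain ⟨v, hfold, _, h1⟩ := pvStepF_fold_aux l f i j hij hsub hfij (j - i) le_rfl
  obtain ⟨w, hv, _, hlast⟩ := h1 (by omega)
  rw [hfold, hv, hlast (by omega)]

-- partial table during the i-loop of the length-L pass
def pvTab (l : List Char) (L s : Nat) : Nat → Nat → Option Int :=
  fun a b => if a ≤ b ∧ b < l.length ∧ (b - a + 1 < L ∨ (b - a + 1 = L ∧ a < s)) then some (pvBnd l a b) else none

-- the diagonal initialisation builds pvTab l 2 0
theorem pvTab_init (l : List Char) :
    (List.range l.length).foldl (fun f i => pvUpd f i i (some 0)) (fun _ _ => none) = pvTab l 2 0 := by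
  have aux : ∀ m, (List.range m).foldl (fun f i => pvUpd f i i (some 0)) (fun _ _ => none)
      = fun a b => if a = b ∧ a < m then some 0 else none := by
    intro m
    induction m with
    | zero => simp
    | succ p ih =>
      rw [List.range_succ, List.foldl_append, List.foldl_cons, List.foldl_nil, ih]
      funext a b
      simp only [pvUpd]
      by_cases h : a = p ∧ b = p
      · rw [if_pos h, if_pos ⟨h.1.trans h.2.symm, by omega⟩]
      · rw [if_neg h]
        by_cases h2 : a = b ∧ a < p
        · rw [if_pos h2, if_pos ⟨h2.1, by omega⟩]
        · rw [if_neg h2, if_neg ?_]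
          rintro ⟨hab, hlt⟩
          rcases Nat.lt_succ_iff_lt_or_eq.mp hlt with h' | h'
          · exact h2 ⟨hab, h'⟩
          · exact h ⟨h', hab ▸ h'⟩
  rw [aux]
  funext a b
  unfold pvTab
  by_cases h : a = b ∧ a < l.length
  · rw [if_pos h, if_pos ⟨h.1.le, by omega, Or.inl (by omega)⟩, ← h.1, pvBnd_self]
  · rw [if_neg h, if_neg ?_]
    rintro ⟨h1, h2, h3 | h3⟩
    · exact h ⟨by omega, by omega⟩
    · omega

-- one i-iteration of the length-L pass advances pvTab l L s to pvTab l L (s+1)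
theorem pvTab_step (l : List Char) (L s : Nat) (hL : 2 ≤ L) (hs : s + L - 1 < l.length) :
    (List.range' s ((s + L - 1) - s)).foldl (pvStepF l s (s + L - 1)) (pvTab l L s) = pvTab l L (s+1) := by
  rw [inner_fold l (pvTab l L s) s (s + L - 1) (by omega) ?_ ?_]
  · funext a b
    simp only [pvUpd]
    by_cases h : a = s ∧ b = s + L - 1
    · rw [if_pos h]
      unfold pvTab
      rw [if_pos ⟨by omega, by omega, Or.inr ⟨by omega, by omega⟩⟩, h.1, h.2]
    · rw [if_neg h]
      unfold pvTab
      by_cases hc : a ≤ b ∧ b < l.length ∧ (b - a + 1 < L ∨ (b - a + 1 = L ∧ a < s))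
      · rw [if_pos hc, if_pos ⟨hc.1, hc.2.1, hc.2.2.imp id (fun hh => ⟨hh.1, by omega⟩)⟩]
      · rw [if_neg hc, if_neg ?_]
        rintro ⟨h1, h2, h3 | h3⟩
        · exact hc ⟨h1, h2, Or.inl h3⟩
        · by_cases has : a = s
          · exact h ⟨has, by omega⟩
          · exact hc ⟨h1, h2, Or.inr ⟨h3.1, by omega⟩⟩
  · intro a b hab hbj hlt
    unfold pvTab
    rw [if_pos ⟨hab, by omega, Or.inl (by omega)⟩]
  · unfold pvTab
    rw [if_neg ?_]
    rintro ⟨_, _, h3 | h3⟩ <;> omega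

-- the whole i-loop of the length-L pass turns pvTab l L 0 into pvTab l (L+1) 0
theorem pvTab_iloop (l : List Char) (L : Nat) (hL : 2 ≤ L) (hLn : L ≤ l.length) :
    (List.range (l.length - L + 1)).foldl
      (fun f i => (List.range' i ((i + L - 1) - i)).foldl (pvStepF l i (i + L - 1)) f)
      (pvTab l L 0) = pvTab l (L+1) 0 := by
  have aux : ∀ s, s ≤ l.length - L + 1 →
      (List.range s).foldl
        (fun f i => (List.range' i ((i + L - 1) - i)).foldl (pvStepF l i (i + L - 1)) f)
        (pvTab l L 0) = pvTab l L s := by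
    intro s
    induction s with
    | zero => intro _; simp
    | succ p ih =>
      intro hp
      rw [List.range_succ, List.foldl_append, List.foldl_cons, List.foldl_nil, ih (by omega),
        pvTab_step l L p hL (by omega)]
  rw [aux (l.length - L + 1) le_rfl]
  funext a b
  unfold pvTab
  by_cases hc : a ≤ b ∧ b < l.length ∧ (b - a + 1 < L ∨ (b - a + 1 = L ∧ a < l.length - L + 1))
  · rw [if_pos hc, if_pos ⟨hc.1, hc.2.1, Or.inl (by rcases hc.2.2 with h | h <;> omega)⟩]
  · rw [if_neg hc, if_neg ?_]
    rintro ⟨h1, h2, h3 | h3⟩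
    · by_cases hlt : b - a + 1 < L
      · exact hc ⟨h1, h2, Or.inl hlt⟩
      · exact hc ⟨h1, h2, Or.inr ⟨by omega, by omega⟩⟩
    · omega

-- the length-loop builds the full table
theorem pvTab_lloop (l : List Char) :
    (List.range' 2 (l.length - 1)).foldl (fun f length =>
      (List.range (l.length - length + 1)).foldl
        (fun f i => (List.range' i ((i + length - 1) - i)).foldl (pvStepF l i (i + length - 1)) f) f)
      (pvTab l 2 0) = pvTab l (l.length + 1) 0 := by
  have aux : ∀ m, m ≤ l.length - 1 →
      (List.range' 2 m).foldl (fun f length =>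
        (List.range (l.length - length + 1)).foldl
          (fun f i => (List.range' i ((i + length - 1) - i)).foldl (pvStepF l i (i + length - 1)) f) f)
        (pvTab l 2 0) = pvTab l (2 + m) 0 := by
    intro m
    induction m with
    | zero => intro _; simp
    | succ p ih =>
      intro hp
      have concat : List.range' 2 (p+1) = List.range' 2 p ++ [2+p] := by
        have := @List.range'_concat 1 2 p
        simpa using this
      rw [concat, List.foldl_append, List.foldl_cons, List.foldl_nil, ih (by omega),
        pvTab_iloop l (2+p) (by omega) (by omega)]
      have e : 2 + p + 1 = 2 + (p + 1) := by omega
      rw [e]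
  rcases Nat.eq_zero_or_pos l.length with h0 | h1
  · have hnil : l = [] := List.length_eq_zero_iff.mp h0
    subst hnil
    show pvTab [] 2 0 = pvTab [] (List.length ([] : List Char) + 1) 0
    funext a b
    unfold pvTab
    rw [if_neg (by rintro ⟨_, hb, _⟩; exact absurd hb (by simp)),
        if_neg (by rintro ⟨_, hb, _⟩; exact absurd hb (by simp))]
  · have := aux (l.length - 1) le_rfl
    have e : 2 + (l.length - 1) = l.length + 1 := by omega
    rwa [e] at this

-- index shift: boundary predicate on c :: rest at positions ≥ s+1 equals that on rest at positions ≥ s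
theorem pvShift_filter (c : Char) (rest : List Char) :
    ∀ (m s : Nat),
      ((List.range' (s+1) m).filter (fun t => !((c::rest)[t]? == (c::rest)[t+1]?))).length
      = ((List.range' s m).filter (fun t => !(rest[t]? == rest[t+1]?))).length := by
  intro m
  induction m with
  | zero => intro _; rfl
  | succ p ih =>
    intro s
    simp only [List.range'_succ, List.filter_cons, List.getElem?_cons_succ]
    split <;> simp_all

-- B's pair count equals the boundary count over the whole string
theorem pvZip_count (l : List Char) :
    ((l.zip l.tail).countP (fun p => !(p.1 == p.2)) : Int) = pvBnd l 0 (l.length - 1) := by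
  unfold pvBnd
  induction l with
  | nil => rfl
  | cons c rest ih =>
    cases rest with
    | nil => rfl
    | cons d r =>
      have hz : (c :: d :: r).zip (c :: d :: r).tail = (c, d) :: ((d :: r).zip ((d :: r).tail)) := rfl
      rw [hz, List.countP_cons]
      have hlen : (c :: d :: r).length - 1 = r.length + 1 := by simp
      rw [hlen]
      simp only [Nat.sub_zero]
      rw [List.range'_succ, List.filter_cons]
      have h0 : ((c :: d :: r)[0]? == (c :: d :: r)[0+1]?) = (c == d) := by simp
      have hsh := pvShift_filter c (d :: r) r.length 0
      have hlen2 : (d :: r).length - 1 = r.length := by simp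
      rw [hlen2] at ih
      simp only [Nat.sub_zero] at ih
      split
      · rename_i hcd
        rw [h0, if_pos hcd, List.length_cons]
        push_cast
        rw [hsh, ← ih]
      · rename_i hcd
        rw [h0, if_neg hcd]
        push_cast
        rw [hsh, ← ih]
        ring

-- ===== bridge: the list-of-lists table implements the function table =====

def pvGood (n : Nat) (dp : List (List (Option Int))) : Prop :=
  dp.length = n ∧ ∀ r ∈ dp, r.length = n

theorem pvGood_set2 (n : Nat) (dp : List (List (Option Int))) (i j : Nat) (v : Option Int)
    (h : pvGood n dp) (hi : i < n) : pvGood n (pvSet2 dp i j v) := by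
  obtain ⟨hlen, hrow⟩ := h
  refine ⟨by simp [pvSet2, hlen], ?_⟩
  intro r hr
  rcases List.mem_or_eq_of_mem_set hr with hmem | rfl
  · exact hrow r hmem
  · rw [List.length_set]
    have : dp[i]? = some dp[i] := List.getElem?_eq_getElem (by omega)
    rw [this]
    exact hrow _ (List.getElem_mem _)

theorem pvGet2_set2 (n : Nat) (dp : List (List (Option Int))) (i j : Nat) (v : Option Int)
    (h : pvGood n dp) (hi : i < n) (hj : j < n) :
    ∀ a b, pvGet2 (pvSet2 dp i j v) a b = pvUpd (pvGet2 dp) i j v a b := by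
  obtain ⟨hlen, hrow⟩ := h
  intro a b
  have hidp : dp[i]? = some dp[i] := List.getElem?_eq_getElem (by omega)
  have hrowlen : (dp[i]'(by omega)).length = n := hrow _ (List.getElem_mem _)
  by_cases ha : a = i
  · subst ha
    rw [pvGet2, pvSet2, List.getElem?_set_self (by omega), Option.getD_some, hidp, Option.getD_some]
    by_cases hb : b = j
    · subst hb
      rw [List.getElem?_set_self (by omega), Option.getD_some, pvUpd, if_pos ⟨rfl, rfl⟩]
    · rw [List.getElem?_set_ne (fun hh => hb hh.symm), pvUpd,
        if_neg (by rintro ⟨-, rfl⟩; exact hb rfl), pvGet2, hidp, Option.getD_some]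
  · rw [pvGet2, pvSet2, List.getElem?_set_ne (fun hh => ha hh.symm), pvUpd,
      if_neg (by rintro ⟨rfl, -⟩; exact ha rfl)]
    rfl

theorem pvStep_bridge (l : List Char) (n i j : Nat) (dp : List (List (Option Int))) (k : Nat)
    (h : pvGood n dp) (hi : i < n) (hj : j < n) :
    pvGood n (pvStep l i j dp k) ∧
      pvGet2 (pvStep l i j dp k) = pvStepF l i j (pvGet2 dp) k := by
  constructor
  · exact pvGood_set2 n dp i j _ h hi
  · funext a b
    rw [pvStep, pvGet2_set2 n dp i j _ h hi hj a b]
    rfl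

theorem pvKfold_bridge (l : List Char) (n i j : Nat) (ks : List Nat) (dp : List (List (Option Int)))
    (h : pvGood n dp) (hi : i < n) (hj : j < n) :
    pvGood n (ks.foldl (pvStep l i j) dp) ∧
      pvGet2 (ks.foldl (pvStep l i j) dp) = ks.foldl (pvStepF l i j) (pvGet2 dp) := by
  induction ks generalizing dp with
  | nil => exact ⟨h, rfl⟩
  | cons k ks ih =>
    obtain ⟨hg, hphi⟩ := pvStep_bridge l n i j dp k h hi hj
    obtain ⟨hg2, hphi2⟩ := ih (pvStep l i j dp k) hg
    exact ⟨hg2, by rw [List.foldl_cons, List.foldl_cons, hphi2, hphi]⟩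

theorem pvIfold_bridge (l : List Char) (n L : Nat) (is : List Nat) (dp : List (List (Option Int)))
    (h : pvGood n dp) (hL : 2 ≤ L) (hb : ∀ i ∈ is, i + L - 1 < n) :
    pvGood n (is.foldl (fun dp i => (List.range' i ((i + L - 1) - i)).foldl (pvStep l i (i + L - 1)) dp) dp) ∧
      pvGet2 (is.foldl (fun dp i => (List.range' i ((i + L - 1) - i)).foldl (pvStep l i (i + L - 1)) dp) dp)
        = is.foldl (fun f i => (List.range' i ((i + L - 1) - i)).foldl (pvStepF l i (i + L - 1)) f) (pvGet2 dp) := by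
  induction is generalizing dp with
  | nil => exact ⟨h, rfl⟩
  | cons i is ih =>
    have hj : i + L - 1 < n := hb i (by simp)
    have hi : i < n := by omega
    obtain ⟨hg, hphi⟩ := pvKfold_bridge l n i (i + L - 1) (List.range' i ((i + L - 1) - i)) dp h hi hj
    obtain ⟨hg2, hphi2⟩ := ih _ hg (fun x hx => hb x (by simp [hx]))
    exact ⟨hg2, by rw [List.foldl_cons, List.foldl_cons, hphi2, hphi]⟩

theorem pvLfold_bridge (l : List Char) (n : Nat) (Ls : List Nat) (dp : List (List (Option Int)))
    (h : pvGood n dp) (hLs : ∀ L ∈ Ls, 2 ≤ L ∧ L ≤ n) :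
    pvGood n (Ls.foldl (fun dp length =>
        (List.range (n - length + 1)).foldl (fun dp i =>
          (List.range' i ((i + length - 1) - i)).foldl (pvStep l i (i + length - 1)) dp) dp) dp) ∧
      pvGet2 (Ls.foldl (fun dp length =>
          (List.range (n - length + 1)).foldl (fun dp i =>
            (List.range' i ((i + length - 1) - i)).foldl (pvStep l i (i + length - 1)) dp) dp) dp)
        = Ls.foldl (fun f length =>
            (List.range (n - length + 1)).foldl (fun f i =>
              (List.range' i ((i + length - 1) - i)).foldl (pvStepF l i (i + length - 1)) f) f) (pvGet2 dp) := by
  induction Ls generalizing dp with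
  | nil => exact ⟨h, rfl⟩
  | cons L Ls ih =>
    obtain ⟨hL2, hLn⟩ := hLs L (by simp)
    have hb : ∀ i ∈ List.range (n - L + 1), i + L - 1 < n := by
      intro i hi
      rw [List.mem_range] at hi
      omega
    obtain ⟨hg, hphi⟩ := pvIfold_bridge l n L (List.range (n - L + 1)) dp h hL2 hb
    obtain ⟨hg2, hphi2⟩ := ih _ hg (fun x hx => hLs x (by simp [hx]))
    exact ⟨hg2, by rw [List.foldl_cons, List.foldl_cons, hphi2, hphi]⟩

theorem pvInit_bridge (n : Nat) (is : List Nat) (dp : List (List (Option Int)))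
    (h : pvGood n dp) (hb : ∀ i ∈ is, i < n) :
    pvGood n (is.foldl (fun dp i => pvSet2 dp i i (some 0)) dp) ∧
      pvGet2 (is.foldl (fun dp i => pvSet2 dp i i (some 0)) dp)
        = is.foldl (fun f i => pvUpd f i i (some 0)) (pvGet2 dp) := by
  induction is generalizing dp with
  | nil => exact ⟨h, rfl⟩
  | cons i is ih =>
    have hi : i < n := hb i (by simp)
    have hg := pvGood_set2 n dp i i (some 0) h hi
    have hphi : pvGet2 (pvSet2 dp i i (some 0)) = pvUpd (pvGet2 dp) i i (some 0) :=
      funext fun a => funext fun b => pvGet2_set2 n dp i i (some 0) h hi hi a b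
    obtain ⟨hg2, hphi2⟩ := ih _ hg (fun x hx => hb x (by simp [hx]))
    exact ⟨hg2, by rw [List.foldl_cons, List.foldl_cons, hphi2, hphi]⟩

theorem pvDp0_good (n : Nat) :
    pvGood n ((List.range n).map (fun _ => List.replicate n (none : Option Int))) := by
  refine ⟨by simp, ?_⟩
  intro r hr
  rw [List.mem_map] at hr
  obtain ⟨-, -, rfl⟩ := hr
  simp

theorem pvDp0_get (n : Nat) :
    pvGet2 ((List.range n).map (fun _ => List.replicate n (none : Option Int))) = fun _ _ => none := by
  funext a b
  rw [pvGet2]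
  rcases Nat.lt_or_ge a n with ha | ha
  · rw [List.getElem?_map, List.getElem?_range ha]
    simp only [Option.map_some, Option.getD_some]
    rcases Nat.lt_or_ge b n with hb | hb
    · rw [List.getElem?_replicate_of_lt hb]; rfl
    · rw [List.getElem?_eq_none (by simpa using hb)]; rfl
  · have h2 : ((List.range n).map (fun _ => List.replicate n (none : Option Int)))[a]? = none :=
      List.getElem?_eq_none (by simpa using ha)
    rw [h2]
    rfl

theorem calculate_minimum_shifts_spec : Claim_equal_calculate_minimum_shifts := by
  intro arts _ hpre
  unfold Spec_calculate_minimum_shifts calculate_minimum_shifts calculate_minimum_shifts_alt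
  have hne : arts.toList ≠ [] := fun h => hpre (by
    have := congrArg String.ofList h
    simpa using this)
  have hn : 1 ≤ arts.toList.length := List.length_pos_iff.mpr hne
  simp only []
  have h0g := pvDp0_good arts.toList.length
  obtain ⟨h1g, h1phi⟩ := pvInit_bridge arts.toList.length (List.range arts.toList.length)
    ((List.range arts.toList.length).map (fun _ => List.replicate arts.toList.length (none : Option Int)))
    h0g (fun i hi => by simpa using hi)
  have hLs : ∀ L ∈ List.range' 2 (arts.toList.length - 1), 2 ≤ L ∧ L ≤ arts.toList.length := by
    intro L hL
    rw [List.mem_range'_1] at hL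
    exact ⟨by omega, by omega⟩
  obtain ⟨h2g, h2phi⟩ := pvLfold_bridge arts.toList arts.toList.length
    (List.range' 2 (arts.toList.length - 1))
    ((List.range arts.toList.length).foldl (fun dp i => pvSet2 dp i i (some 0))
      ((List.range arts.toList.length).map (fun _ => List.replicate arts.toList.length (none : Option Int))))
    h1g hLs
  rw [h2phi, h1phi, pvDp0_get, pvTab_init arts.toList, pvTab_lloop arts.toList]
  unfold pvTab
  rw [if_pos ⟨Nat.zero_le _, by omega, Or.inl (by omega)⟩, Option.getD_some,
    PySem.List.foldl_ite_add_one]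
  have hc : ((arts.toList.zip arts.toList.tail).countP (fun p => decide (p.1 ≠ p.2)))
      = ((arts.toList.zip arts.toList.tail).countP (fun p => !(p.1 == p.2))) :=
    List.countP_congr (fun x _ => by simp)
  rw [hc, zero_add, pvZip_count arts.toList]
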